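-- pv_equiv track=rewrite | github.com/doocs/leetcode | solution/1500-1599/1564.Put Boxes Into the Warehouse I/Solution.py | maxBoxesInWarehouse
-- ===== SOURCE A (Python) =====
-- from typing import List
--
-- def maxBoxesInWarehouse(boxes: List[int], warehouse: List[int]) -> int:
--     n = len(warehouse)
--     left = [warehouse[0]] * n
--     for i in range(1, n):
--         left[i] = min(left[i - 1], warehouse[i])
--     boxes.sort()
--     i, j = 0, n - 1
--     while i < len(boxes):
--         while j >= 0 and left[j] < boxes[i]:
--             j -= 1
--         if j < 0:
--             break
--         i, j = i + 1, j - 1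
--     return i
-- ===== SOURCE B (Python) =====
-- from typing import List
--
-- def maxBoxesInWarehouse(boxes: List[int], warehouse: List[int]) -> int:
--     boxes.sort()
--     min_h = warehouse[0]
--     k = len(boxes) - 1
--     cnt = 0
--     for h in warehouse:
--         min_h = min(min_h, h)
--         while k >= 0 and boxes[k] > min_h:
--             k -= 1
--         if k < 0:
--             break
--         cnt += 1
--         k -= 1
--     return cnt
-- ===== Notes on version B (the rewrite author's own statement) =====
-- stated objective: alternative
-- what changed: B drops A's materialized prefix-min array and its box-outer/deep-slot-inner two-pointer loop, instead scanning the warehouse forward once with a fused running minimum while a pointer walks the sorted boxes from the largest down.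
import Mathlib
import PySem

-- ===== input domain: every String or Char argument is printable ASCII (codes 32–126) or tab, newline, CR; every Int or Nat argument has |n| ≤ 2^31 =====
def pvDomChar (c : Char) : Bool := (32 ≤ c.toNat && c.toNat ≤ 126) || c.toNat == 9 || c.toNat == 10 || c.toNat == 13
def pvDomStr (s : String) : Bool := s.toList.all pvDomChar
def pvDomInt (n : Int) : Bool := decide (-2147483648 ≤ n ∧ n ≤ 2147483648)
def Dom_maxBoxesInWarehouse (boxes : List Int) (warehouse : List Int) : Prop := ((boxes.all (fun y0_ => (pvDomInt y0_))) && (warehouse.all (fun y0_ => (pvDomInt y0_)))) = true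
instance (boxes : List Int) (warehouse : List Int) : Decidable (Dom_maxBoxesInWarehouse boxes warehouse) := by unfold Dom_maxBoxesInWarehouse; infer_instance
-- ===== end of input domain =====

-- B fuses A's prefix-min array into a single running minimum and matches boxes from the
-- largest down while scanning slots forward (alternative decomposition, same cost).
-- Both A and B sort `boxes` in place (same mutation); the equivalence proved is about the return value.

-- ===== PORT A =====
-- inner `while j >= 0 and left[j] < boxes[i]`; j stays in range so getD is exact for Python's left[j]
def skipA (left : List Int) (x : Int) (j : Int) : Int :=
  if h : 0 ≤ j ∧ left.getD j.toNat 0 < x then skipA left x (j - 1) else j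
termination_by (j + 1).toNat
decreasing_by omega

-- the outer `while i < len(boxes)` loop, one step per box
def loopA (left : List Int) : List Int → Int → Int → Int
  | [], _, i => i
  | x :: bs, j, i =>
    let j' := skipA left x j
    if j' < 0 then i else loopA left bs (j' - 1) (i + 1)

-- `left[i] = min(left[i-1], warehouse[i])`, carrying left[i-1] as `cur`
def buildLeftA (cur : Int) : List Int → List Int
  | [] => [cur]
  | h :: t => cur :: buildLeftA (min cur h) t

def maxBoxesInWarehouse (boxes : List Int) (warehouse : List Int) : Int :=
  match warehouse with
  | [] => 0  -- Python raises IndexError here (warehouse[0]); excluded by Pre_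
  | w0 :: rest =>
    let left := buildLeftA w0 rest
    let bs := PySem.List.sorted boxes (fun x => x) false
    loopA left bs ((warehouse.length : Int) - 1) 0

-- ===== PORT B =====
-- `while k >= 0 and boxes[k] > min_h`; k stays in range so getD is exact for Python's boxes[k]
def skipB (bs : List Int) (mh : Int) (k : Int) : Int :=
  if h : 0 ≤ k ∧ mh < bs.getD k.toNat 0 then skipB bs mh (k - 1) else k
termination_by (k + 1).toNat
decreasing_by omega

-- the `for h in warehouse` loop with state (min_h, k, cnt)
def loopB (bs : List Int) : List Int → Int → Int → Int → Int
  | [], _, _, cnt => cnt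
  | h :: ws, mh, k, cnt =>
    let mh' := min mh h
    let k' := skipB bs mh' k
    if k' < 0 then cnt else loopB bs ws mh' (k' - 1) (cnt + 1)

def maxBoxesInWarehouse_alt (boxes : List Int) (warehouse : List Int) : Int :=
  match warehouse with
  | [] => 0  -- Python raises IndexError here (warehouse[0]); excluded by Pre_
  | w0 :: _ =>
    let bs := PySem.List.sorted boxes (fun x => x) false
    loopB bs warehouse w0 ((bs.length : Int) - 1) 0

-- ===== PRECONDITION & SPEC =====
-- Pre_ excludes only the empty warehouse, on which both Pythons raise IndexError at warehouse[0].
def Pre_maxBoxesInWarehouse (boxes : List Int) (warehouse : List Int) : Prop := warehouse ≠ []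
instance (boxes : List Int) (warehouse : List Int) : Decidable (Pre_maxBoxesInWarehouse boxes warehouse) := by unfold Pre_maxBoxesInWarehouse; infer_instance
def pvWitness_maxBoxesInWarehouse : List Int × List Int := ([1, 3, 2], [4, 3, 1])

def Spec_maxBoxesInWarehouse (boxes : List Int) (warehouse : List Int) (out : Int) : Prop := out = maxBoxesInWarehouse_alt boxes warehouse
instance (boxes : List Int) (warehouse : List Int) (out : Int) : Decidable (Spec_maxBoxesInWarehouse boxes warehouse out) := by unfold Spec_maxBoxesInWarehouse; infer_instance

-- ===== CLAIM (what is proved, stated in full; the proofs are below) =====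
def Claim_equal_maxBoxesInWarehouse : Prop := ∀ (boxes : List Int) (warehouse : List Int), Dom_maxBoxesInWarehouse boxes warehouse → Pre_maxBoxesInWarehouse boxes warehouse → Spec_maxBoxesInWarehouse boxes warehouse (maxBoxesInWarehouse boxes warehouse)

-- ===== LEMMAS AND PROOFS =====

def pm (mh : Int) : List Int → List Int
  | [] => []
  | h :: ws => min mh h :: pm (min mh h) ws

theorem pm_le (mh : Int) (ws : List Int) : ∀ z ∈ pm mh ws, z ≤ mh := by
  induction ws generalizing mh with
  | nil => simp [pm]
  | cons h t ih =>
    intro z hz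
    simp [pm] at hz
    rcases hz with h1 | h2
    · omega
    · have := ih (min mh h) z h2; omega

theorem pm_pairwise (mh : Int) (ws : List Int) : (pm mh ws).Pairwise (fun a b => b ≤ a) := by
  induction ws generalizing mh with
  | nil => simp [pm]
  | cons h t ih =>
    simp [pm]
    refine ⟨fun z hz => ?_, ih (min mh h)⟩
    have := pm_le (min mh h) t z hz
    omega

theorem pm_length (mh : Int) (ws : List Int) : (pm mh ws).length = ws.length := by
  induction ws generalizing mh with
  | nil => rfl
  | cons h t ih => simp [pm, ih]

def revtake (l : List Int) (j : Int) : List Int := (l.take (j + 1).toNat).reverse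

theorem revtake_nil (l : List Int) (j : Int) (h : j < 0) : revtake l j = [] := by
  unfold revtake
  have : (j + 1).toNat = 0 := by omega
  simp [this]

theorem revtake_cons (l : List Int) (j : Int) (h0 : 0 ≤ j) (h1 : j < l.length) :
    revtake l j = l.getD j.toNat 0 :: revtake l (j - 1) := by
  unfold revtake
  have h2 : (j + 1).toNat = j.toNat + 1 := by omega
  have h3 : (j - 1 + 1).toNat = j.toNat := by omega
  have h4 : j.toNat < l.length := by omega
  rw [h2, h3, List.take_succ]
  simp [List.getElem?_eq_getElem h4, List.getD_eq_getElem?_getD, List.getElem?_eq_getElem h4]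

theorem revtake_full (l : List Int) (j : Int) (h : j = (l.length : Int) - 1) :
    revtake l j = l.reverse := by
  unfold revtake
  have : (j + 1).toNat = l.length := by omega
  simp [this]

def gS : List Int → List Int → Nat
  | [], _ => 0
  | _ :: _, [] => 0
  | x :: b, y :: L => if y < x then gS (x :: b) L else 1 + gS b L
termination_by b L => (b.length, L.length)

def gL : List Int → List Int → Nat
  | [], _ => 0
  | _ :: _, [] => 0
  | y :: S, x :: B => if y < x then gL (y :: S) B else 1 + gL S B
termination_by S B => (S.length, B.length)

theorem gL_eq_gS (S B : List Int) : gL S B = gS (S.map Neg.neg) (B.map Neg.neg) := by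
  fun_induction gL S B with
  | case1 B => simp [gS]
  | case2 y S => simp [gS]
  | case3 y S x B h ih => simp [gS, ih, show (-x : Int) < -y by omega, h]
  | case4 y S x B h ih => simp [gS, ih, show ¬((-x : Int) < -y) by omega, h]

def ok (b L : List Int) (r : Nat) : Prop :=
  r ≤ b.length ∧ r ≤ L.length ∧ ∀ i < r, b.getD i 0 ≤ L.getD (L.length - r + i) 0

theorem getD_mem_of_lt (L : List Int) (t : Nat) (ht : t < L.length) : L.getD t 0 ∈ L := by
  rw [List.getD_eq_getElem L 0 ht]
  exact List.getElem_mem ht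

theorem ok_gS (b L : List Int) (hL : L.Pairwise (· ≤ ·)) : ok b L (gS b L) := by
  fun_induction gS b L with
  | case1 L => exact ⟨by simp [gS], by simp [gS], by simp [gS]⟩
  | case2 x b => exact ⟨by simp [gS], by simp [gS], by simp [gS]⟩
  | case3 x b y L h ih =>
    obtain ⟨h1, h2, h3⟩ := ih (List.Pairwise.of_cons hL)
    refine ⟨h1, by simpa using Nat.le_succ_of_le h2, fun i hi => ?_⟩
    have he : (y :: L).length - gS (x :: b) L + i = (L.length - gS (x :: b) L + i) + 1 := by
      simp; omega
    rw [he, List.getD_cons_succ]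
    exact h3 i hi
  | case4 x b y L h ih =>
    obtain ⟨h1, h2, h3⟩ := ih (List.Pairwise.of_cons hL)
    have hy : ∀ z ∈ L, y ≤ z := fun z hz => (List.pairwise_cons.mp hL).1 z hz
    refine ⟨by simp; omega, by simp; omega, fun i hi => ?_⟩
    match i with
    | 0 =>
      rw [List.getD_cons_zero]
      rcases Nat.lt_or_ge (gS b L) L.length with hc | hc
      · have he : (y :: L).length - (1 + gS b L) + 0 = (L.length - gS b L - 1) + 1 := by
          simp; omega
        rw [he, List.getD_cons_succ]
        have := hy _ (getD_mem_of_lt L (L.length - gS b L - 1) (by omega))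
        omega
      · have hgl : gS b L = L.length := by omega
        have he : (y :: L).length - (1 + gS b L) + 0 = 0 := by simp; omega
        rw [he, List.getD_cons_zero]
        omega
    | i + 1 =>
      rw [List.getD_cons_succ]
      have he : (y :: L).length - (1 + gS b L) + (i + 1) = (L.length - gS b L + i) + 1 := by
        simp; omega
      rw [he, List.getD_cons_succ]
      exact h3 i (by omega)

theorem gS_ge (b L : List Int) : ∀ r, ok b L r → r ≤ gS b L := by
  fun_induction gS b L with
  | case1 L => intro r hr; simpa [gS] using hr.1
  | case2 x b => intro r hr; simpa [gS] using hr.2.1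
  | case3 x b y L h ih =>
    intro r ⟨h1, h2, h3⟩
    have h2' : r ≤ L.length + 1 := by simpa using h2
    have hrL : r ≤ L.length := by
      rcases Nat.lt_or_ge r (L.length + 1) with hc | hc
      · omega
      · exfalso
        have hr : r = L.length + 1 := by omega
        have := h3 0 (by omega)
        rw [hr] at this
        simp at this
        omega
    refine ih r ⟨h1, hrL, fun i hi => ?_⟩
    have := h3 i hi
    have he : (y :: L).length - r + i = (L.length - r + i) + 1 := by simp; omega
    rw [he, List.getD_cons_succ] at this
    exact this
  | case4 x b y L h ih =>
    intro r ⟨h1, h2, h3⟩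
    match r with
    | 0 => omega
    | s + 1 =>
      have hs : s ≤ gS b L := by
        refine ih s ⟨by simpa using h1, by simpa using h2, fun i hi => ?_⟩
        have := h3 (i + 1) (by omega)
        rw [List.getD_cons_succ] at this
        have he : (y :: L).length - (s + 1) + (i + 1) = (L.length - s + i) + 1 := by
          simp; omega
        rw [he, List.getD_cons_succ] at this
        exact this
      omega

theorem getD_negrev (X : List Int) (t : Nat) (ht : t < X.length) :
    ((X.reverse).map Neg.neg).getD t 0 = -(X.getD (X.length - 1 - t) 0) := by
  have h1 : t < ((X.reverse).map Neg.neg).length := by simpa using ht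
  have h2 : X.length - 1 - t < X.length := by omega
  rw [List.getD_eq_getElem _ 0 h1, List.getD_eq_getElem _ 0 h2]
  simp [List.getElem_reverse]

theorem ok_negrev_mp (b L : List Int) (r : Nat) (h : ok b L r) :
    ok ((L.reverse).map Neg.neg) ((b.reverse).map Neg.neg) r := by
  obtain ⟨h1, h2, h3⟩ := h
  refine ⟨by simpa using h2, by simpa using h1, fun i hi => ?_⟩
  have hbl : ((b.reverse).map Neg.neg).length = b.length := by simp
  rw [hbl, getD_negrev L i (by omega), getD_negrev b (b.length - r + i) (by omega)]
  have he : b.length - 1 - (b.length - r + i) = r - 1 - i := by omega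
  rw [he]
  have := h3 (r - 1 - i) (by omega)
  have he2 : L.length - r + (r - 1 - i) = L.length - 1 - i := by omega
  rw [he2] at this
  omega

theorem negrev_negrev (X : List Int) :
    ((((X.reverse).map Neg.neg).reverse).map Neg.neg) = X := by
  simp

theorem gS_sym (b L : List Int) (hL : L.Pairwise (· ≤ ·))
    (hb : ((b.reverse).map Neg.neg).Pairwise (· ≤ ·)) :
    gS b L = gS ((L.reverse).map Neg.neg) ((b.reverse).map Neg.neg) := by
  have le1 : gS b L ≤ gS ((L.reverse).map Neg.neg) ((b.reverse).map Neg.neg) :=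
    gS_ge _ _ _ (ok_negrev_mp b L _ (ok_gS b L hL))
  have le2 : gS ((L.reverse).map Neg.neg) ((b.reverse).map Neg.neg) ≤ gS b L := by
    have h := ok_negrev_mp _ _ _ (ok_gS ((L.reverse).map Neg.neg) ((b.reverse).map Neg.neg) hb)
    rw [negrev_negrev, negrev_negrev] at h
    exact gS_ge _ _ _ h
  omega

theorem skipA_bounds (left : List Int) (x j : Int) : -1 ≤ j → -1 ≤ skipA left x j ∧ skipA left x j ≤ j := by
  fun_induction skipA left x j with
  | case1 j h ih => intro _; have := ih (by omega); omega
  | case2 j h => intro hj; omega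

theorem skipA_stop (left : List Int) (x j : Int) :
    ¬(0 ≤ skipA left x j ∧ left.getD (skipA left x j).toNat 0 < x) := by
  fun_induction skipA left x j with
  | case1 j h ih => exact ih
  | case2 j h => exact h

theorem skipA_gS (left : List Int) (x : Int) (bs : List Int) (j : Int) :
    j < (left.length : Int) →
    gS (x :: bs) (revtake left j) = gS (x :: bs) (revtake left (skipA left x j)) := by
  fun_induction skipA left x j with
  | case1 j h ih =>
    intro hj
    rw [revtake_cons left j h.1 hj, gS, if_pos h.2]
    exact ih (by omega)
  | case2 j h => intro _; rfl

theorem loopA_eq (left : List Int) (bs : List Int) (j i : Int)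
    (hj : -1 ≤ j) (hj2 : j < (left.length : Int)) :
    loopA left bs j i = i + (gS bs (revtake left j) : Int) := by
  induction bs generalizing j i with
  | nil => simp [loopA, gS]
  | cons x bs ih =>
    have hb := skipA_bounds left x j hj
    rw [loopA]
    rw [show (gS (x :: bs) (revtake left j) : Int) = (gS (x :: bs) (revtake left (skipA left x j)) : Int) from by rw [skipA_gS left x bs j hj2]]
    by_cases hc : skipA left x j < 0
    · rw [if_pos hc, revtake_nil left _ hc]
      simp [gS]
    · rw [if_neg hc]
      have h0 : 0 ≤ skipA left x j := by omega
      have hlt : skipA left x j < (left.length : Int) := by omega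
      rw [revtake_cons left _ h0 hlt, gS,
        if_neg (by have := skipA_stop left x j; omega)]
      rw [ih (skipA left x j - 1) (i + 1) (by omega) (by omega)]
      push_cast
      ring

theorem skipB_bounds (bs : List Int) (mh k : Int) : -1 ≤ k → -1 ≤ skipB bs mh k ∧ skipB bs mh k ≤ k := by
  fun_induction skipB bs mh k with
  | case1 k h ih => intro _; have := ih (by omega); omega
  | case2 k h => intro hk; omega

theorem skipB_stop (bs : List Int) (mh k : Int) :
    ¬(0 ≤ skipB bs mh k ∧ mh < bs.getD (skipB bs mh k).toNat 0) := by
  fun_induction skipB bs mh k with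
  | case1 k h ih => exact ih
  | case2 k h => exact h

theorem skipB_gL (bs : List Int) (mh : Int) (S : List Int) (k : Int) :
    k < (bs.length : Int) →
    gL (mh :: S) (revtake bs k) = gL (mh :: S) (revtake bs (skipB bs mh k)) := by
  fun_induction skipB bs mh k with
  | case1 k h ih =>
    intro hk
    rw [revtake_cons bs k h.1 hk, gL, if_pos h.2]
    exact ih (by omega)
  | case2 k h => intro _; rfl

theorem loopB_eq (bs : List Int) (ws : List Int) (mh k cnt : Int)
    (hk : -1 ≤ k) (hk2 : k < (bs.length : Int)) :
    loopB bs ws mh k cnt = cnt + (gL (pm mh ws) (revtake bs k) : Int) := by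
  induction ws generalizing mh k cnt with
  | nil => simp [loopB, pm, gL]
  | cons h ws ih =>
    have hb := skipB_bounds bs (min mh h) k hk
    rw [loopB, pm]
    rw [show (gL (min mh h :: pm (min mh h) ws) (revtake bs k) : Int)
        = (gL (min mh h :: pm (min mh h) ws) (revtake bs (skipB bs (min mh h) k)) : Int) from by
      rw [skipB_gL bs (min mh h) _ k hk2]]
    by_cases hc : skipB bs (min mh h) k < 0
    · rw [if_pos hc, revtake_nil bs _ hc]
      simp [gL]
    · rw [if_neg hc]
      have h0 : 0 ≤ skipB bs (min mh h) k := by omega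
      have hlt : skipB bs (min mh h) k < (bs.length : Int) := by omega
      rw [revtake_cons bs _ h0 hlt, gL,
        if_neg (by have := skipB_stop bs (min mh h) k; omega)]
      rw [ih (min mh h) (skipB bs (min mh h) k - 1) (cnt + 1) (by omega) (by omega)]
      push_cast
      ring

theorem buildLeftA_eq_pm (cur : Int) (t : List Int) :
    buildLeftA cur t = cur :: pm cur t := by
  induction t generalizing cur with
  | nil => simp [buildLeftA, pm]
  | cons h t ih => simp [buildLeftA, pm, ih, min_self]

theorem length_buildLeftA (cur : Int) (t : List Int) : (buildLeftA cur t).length = t.length + 1 := by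
  rw [buildLeftA_eq_pm]; simp [pm_length]

theorem main_eq (boxes warehouse : List Int) (h : warehouse ≠ []) :
    maxBoxesInWarehouse boxes warehouse = maxBoxesInWarehouse_alt boxes warehouse := by
  match warehouse with
  | [] => exact absurd rfl h
  | w0 :: rest =>
    set bs := PySem.List.sorted boxes (fun x => x) false with hbs
    set left := buildLeftA w0 rest with hleft
    have hlen : left.length = rest.length + 1 := length_buildLeftA w0 rest
    -- A side
    have hA : maxBoxesInWarehouse boxes (w0 :: rest) = (gS bs left.reverse : Int) := by
      rw [maxBoxesInWarehouse]
      rw [loopA_eq left bs _ 0 (by simp) (by simp [hlen])]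
      rw [revtake_full left _ (by simp [hlen])]
      omega
    -- B side
    have hpm : pm w0 (w0 :: rest) = left := by
      rw [pm, min_self, hleft, buildLeftA_eq_pm]
    have hB : maxBoxesInWarehouse_alt boxes (w0 :: rest) = (gL left bs.reverse : Int) := by
      rw [maxBoxesInWarehouse_alt]
      rw [loopB_eq bs (w0 :: rest) w0 ((bs.length : Int) - 1) 0 (by omega) (by omega)]
      rw [hpm, revtake_full bs _ rfl]
      omega
    -- sortedness
    have hbsp : bs.Pairwise (· ≤ ·) := by
      have := PySem.List.sorted_pairwise (xs := boxes) (key := fun x : Int => x)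
      simpa using this
    have hleftp : left.Pairwise (fun a b => b ≤ a) := by
      rw [hleft, buildLeftA_eq_pm]
      refine List.pairwise_cons.mpr ⟨fun z hz => ?_, pm_pairwise w0 rest⟩
      exact pm_le w0 rest z hz
    have hLrev : (left.reverse).Pairwise (· ≤ ·) := by
      rw [List.pairwise_reverse]; exact hleftp
    have hbrev : ((bs.reverse).map Neg.neg).Pairwise (· ≤ ·) := by
      rw [List.pairwise_map, List.pairwise_reverse]
      exact hbsp.imp (fun hab => by omega)
    rw [hA, hB, gL_eq_gS]
    rw [gS_sym bs left.reverse hLrev hbrev]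
    simp

-- ===== VERDICT (by name: the statement is the Claim_ definition above) =====
theorem maxBoxesInWarehouse_spec : Claim_equal_maxBoxesInWarehouse := by
  intro boxes warehouse _ hpre
  unfold Spec_maxBoxesInWarehouse
  exact main_eq boxes warehouse hpre
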